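-- pv_equiv track=rewrite | github.com/QuinnAho/csc-5991-hw1 | src/training/metrics.py | _tokens_to_slots
-- ===== SOURCE A (Python) =====
-- from typing import Sequence
--
-- SPECIAL_TOKENS = {"<PAD>", "<SOS>", "<EOS>", "<UNK>"}
--
-- SLOT_NAMES = ("effect", "velocity", "direction", "spread", "drift", "burst", "flicker", "density")
--
-- def _clean_tokens(tokens: Sequence[str]) -> list[str]:
--     """Remove special tokens while preserving the generated token order."""
--
--     return [token for token in tokens if token not in SPECIAL_TOKENS]
--
-- def _tokens_to_slots(tokens: Sequence[str]) -> dict[str, str]: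
--     """Parse a flat canonical token sequence into slot-value pairs."""
--
--     cleaned = _clean_tokens(tokens)
--     slots: dict[str, str] = {}
--     for index in range(0, len(cleaned) - 1, 2):
--         slot_name = cleaned[index]
--         slot_value = cleaned[index + 1]
--         if slot_name in SLOT_NAMES:
--             slots[slot_name] = slot_value
--     return slots
-- ===== SOURCE B (Python) =====
-- from typing import Sequence
--
-- SPECIAL_TOKENS = {"<PAD>", "<SOS>", "<EOS>", "<UNK>"}
--
-- SLOT_NAMES = ("effect", "velocity", "direction", "spread", "drift", "burst", "flicker", "density")
--
-- def _tokens_to_slots(tokens: Sequence[str]) -> dict[str, str]: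
--     """Single pass: thread the name/value pairing state through one loop
--     instead of building a cleaned list and indexing it by parity."""
--     slots: dict[str, str] = {}
--     pending = None  # the slot name awaiting its value, if any
--     for token in tokens:
--         if token in SPECIAL_TOKENS:
--             continue
--         if pending is None:
--             pending = token
--         else:
--             if pending in SLOT_NAMES:
--                 slots[pending] = token
--             pending = None
--     return slots
-- ===== Notes on version B (the rewrite author's own statement) =====
-- stated objective: simpler
-- what changed: Replaces the two-pass clean-list-then-index-by-parity parse with a single pass over the original tokens that threads a pending slot name through the loop, so no cleaned list is built and no indexing is needed.
import Mathlib
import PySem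

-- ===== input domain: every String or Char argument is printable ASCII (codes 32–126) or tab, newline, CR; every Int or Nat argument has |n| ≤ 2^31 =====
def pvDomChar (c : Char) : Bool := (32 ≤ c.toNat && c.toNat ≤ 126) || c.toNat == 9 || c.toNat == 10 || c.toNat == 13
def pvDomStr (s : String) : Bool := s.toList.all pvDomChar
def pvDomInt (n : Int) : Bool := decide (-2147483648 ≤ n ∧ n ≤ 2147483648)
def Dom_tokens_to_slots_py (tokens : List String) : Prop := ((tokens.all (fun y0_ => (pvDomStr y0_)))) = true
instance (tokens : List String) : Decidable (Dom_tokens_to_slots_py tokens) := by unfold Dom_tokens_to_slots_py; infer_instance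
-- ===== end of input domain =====

-- B replaces A's clean-then-index-by-parity two-pass parse with a single pass that
-- threads the pending slot name through the loop (objective: simpler, one pass).

-- ===== PORT A =====
-- SPECIAL_TOKENS = {"<PAD>", "<SOS>", "<EOS>", "<UNK>"}  (a set literal)
def pvSpecialTokens : PySem.Set String := PySem.Set.ofList ["<PAD>", "<SOS>", "<EOS>", "<UNK>"]

-- SLOT_NAMES = ("effect", …)
def pvSlotNames : List String :=
  ["effect", "velocity", "direction", "spread", "drift", "burst", "flicker", "density"]

-- _clean_tokens: [token for token in tokens if token not in SPECIAL_TOKENS]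
def pvCleanTokens (tokens : List String) : List String :=
  tokens.filter (fun token => !(pvSpecialTokens.contains token))

def tokens_to_slots_py (tokens : List String) : List (String × String) :=
  let cleaned := pvCleanTokens tokens
  -- for index in range(0, len(cleaned) - 1, 2): indices are always in range,
  -- so cleaned[index] / cleaned[index+1] are ported with pyGetD (default never used)
  let slots : PySem.Dict String String :=
    (PySem.List.pyRange 0 ((cleaned.length : Int) - 1) 2).foldl
      (fun slots index =>
        let slot_name := PySem.List.pyGetD cleaned index ""
        let slot_value := PySem.List.pyGetD cleaned (index + 1) ""
        if pvSlotNames.contains slot_name then slots.insert slot_name slot_value else slots)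
      PySem.Dict.empty
  slots.items

-- ===== PORT B =====
-- one step of Source B's loop: skip specials, otherwise toggle the pending name
def pvStepB (st : Option String × PySem.Dict String String) (token : String) :
    Option String × PySem.Dict String String :=
  if pvSpecialTokens.contains token then st
  else
    match st.1 with
    | none => (some token, st.2)
    | some pending =>
        (none, if pvSlotNames.contains pending then st.2.insert pending token else st.2)

def tokens_to_slots_py_alt (tokens : List String) : List (String × String) :=
  ((tokens.foldl pvStepB (none, PySem.Dict.empty)).2).items

-- ===== PRECONDITION & SPEC =====
def Spec_tokens_to_slots_py (tokens : List String) (out : List (String × String)) : Prop := out = tokens_to_slots_py_alt tokens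
instance (tokens : List String) (out : List (String × String)) : Decidable (Spec_tokens_to_slots_py tokens out) := by unfold Spec_tokens_to_slots_py; infer_instance

-- ===== CLAIM (what is proved, stated in full; the proofs are below) =====
def Claim_equal_tokens_to_slots_py : Prop := ∀ (tokens : List String), Dom_tokens_to_slots_py tokens → Spec_tokens_to_slots_py tokens (tokens_to_slots_py tokens)

-- ===== LEMMAS AND PROOFS =====

-- the common skeleton: consume the cleaned list two tokens at a time
def pvPairRec : List String → PySem.Dict String String → PySem.Dict String String
  | x :: y :: rest, d =>
      pvPairRec rest (if pvSlotNames.contains x then d.insert x y else d)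
  | _, d => d

-- range(0, b, 2) peels its head for positive b
theorem pvPyRange_two_cons (b : Int) (hb : 0 < b) :
    PySem.List.pyRange 0 b 2 = 0 :: (PySem.List.pyRange 0 (b - 2) 2).map (· + 2) := by
  rw [PySem.List.pyRange_of_pos _ _ (by norm_num), PySem.List.pyRange_of_pos _ _ (by norm_num)]
  by_cases h2 : 0 < b - 2
  · have hc : ((b - 0 + 2 - 1) / 2).toNat = ((b - 2 - 0 + 2 - 1) / 2).toNat + 1 := by omega
    rw [if_pos hb, if_pos h2, hc, List.range_succ_eq_map]
    simp only [List.map_cons, List.map_map]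
    refine congrArg₂ _ (by norm_num) ?_
    apply List.map_congr_left
    intro k _
    simp only [Function.comp_apply, Nat.succ_eq_add_one]
    push_cast
    ring
  · have hc : ((b - 0 + 2 - 1) / 2).toNat = 1 := by omega
    rw [if_pos hb, if_neg h2, hc]
    simp

theorem pvPyGetD_cons_cons {x y : String} {l : List String} {i : Int} (hi : 0 ≤ i) (d : String) :
    PySem.List.pyGetD (x :: y :: l) (i + 2) d = PySem.List.pyGetD l i d := by
  unfold PySem.List.pyGetD
  rw [PySem.List.pyGet?_of_nonneg _ (show (0:Int) ≤ i + 2 by omega),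
    PySem.List.pyGet?_of_nonneg _ hi]
  have h1 : (i + 2).toNat = i.toNat + 2 := by omega
  rw [h1]
  simp

-- A's indexed loop over the cleaned list is the pairwise recursion
theorem pvLoopA (c : List String) (d : PySem.Dict String String) :
    (PySem.List.pyRange 0 ((c.length : Int) - 1) 2).foldl
      (fun slots index =>
        if pvSlotNames.contains (PySem.List.pyGetD c index "") then
          slots.insert (PySem.List.pyGetD c index "") (PySem.List.pyGetD c (index + 1) "")
        else slots)
      d = pvPairRec c d := by
  induction c, d using pvPairRec.induct with
  | case1 x y rest d ih =>
    have hb : (0 : Int) < ((x :: y :: rest).length : Int) - 1 := by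
      simp only [List.length_cons]; push_cast; omega
    rw [pvPyRange_two_cons _ hb]
    have hlen : ((x :: y :: rest).length : Int) - 1 - 2 = ((rest.length : Int) - 1) := by
      simp only [List.length_cons]; push_cast; ring
    rw [List.foldl_cons, List.foldl_map, hlen]
    have hd0 : (if pvSlotNames.contains (PySem.List.pyGetD (x :: y :: rest) 0 "") then
          d.insert (PySem.List.pyGetD (x :: y :: rest) 0 "")
            (PySem.List.pyGetD (x :: y :: rest) (0 + 1) "")
        else d) = (if pvSlotNames.contains x then d.insert x y else d) := by
      have h1 : PySem.List.pyGetD (x :: y :: rest) 0 "" = x := by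
        simp [PySem.List.pyGetD, PySem.List.pyGet?_zero_cons]
      have h2 : PySem.List.pyGetD (x :: y :: rest) (0 + 1) "" = y := by
        simp [PySem.List.pyGetD]
      rw [h1, h2]
    rw [hd0]
    rw [PySem.List.foldl_congr_mem _ _
      (fun slots index =>
        if pvSlotNames.contains (PySem.List.pyGetD rest index "") then
          slots.insert (PySem.List.pyGetD rest index "") (PySem.List.pyGetD rest (index + 1) "")
        else slots) _
      ?_]
    · exact ih
    · intro acc i hi
      have hi0 : 0 ≤ i := ((PySem.List.mem_pyRange_iff_of_pos (by norm_num) i).mp hi).1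
      simp only
      rw [pvPyGetD_cons_cons hi0, show i + 2 + 1 = (i + 1) + 2 from by ring,
        pvPyGetD_cons_cons (by omega)]
  | case2 c d hc =>
    -- cleaned list has fewer than two tokens: the range is empty, pvPairRec keeps d
    have hb : ¬ (0 : Int) < ((c.length : Int) - 1) := by
      match c, hc with
      | [], _ => simp
      | [x], _ => simp
      | x :: y :: rest, hc => exact absurd rfl (hc x y rest)
    rw [PySem.List.pyRange_of_pos _ _ (by norm_num), if_neg (by omega)]
    match c, hc with
    | [], _ => rfl
    | [x], _ => rfl
    | x :: y :: rest, hc => exact absurd rfl (hc x y rest)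

-- B's fold over all tokens is its fold over the cleaned tokens
theorem pvLoopB_filter (tokens : List String) (st : Option String × PySem.Dict String String) :
    tokens.foldl pvStepB st = (pvCleanTokens tokens).foldl pvStepB st := by
  induction tokens generalizing st with
  | nil => rfl
  | cons t rest ih =>
    by_cases h : t ∈ pvSpecialTokens
    · have hs : pvStepB st t = st := by simp [pvStepB, h]
      have hcl : pvCleanTokens (t :: rest) = pvCleanTokens rest := by
        simp [pvCleanTokens, h]
      rw [List.foldl_cons, hs, ih, hcl]
    · have hcl : pvCleanTokens (t :: rest) = t :: pvCleanTokens rest := by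
        simp [pvCleanTokens, h]
      rw [List.foldl_cons, ih, hcl, List.foldl_cons]

-- B's fold over the cleaned list, started with no pending name, is the pairwise recursion
theorem pvLoopB (c : List String) (d : PySem.Dict String String)
    (hc : ∀ t ∈ c, t ∉ pvSpecialTokens) :
    (c.foldl pvStepB (none, d)).2 = pvPairRec c d := by
  induction c, d using pvPairRec.induct with
  | case1 x y rest d ih =>
    have hx : x ∉ pvSpecialTokens := hc x (by simp)
    have hy : y ∉ pvSpecialTokens := hc y (by simp)
    simp only [List.foldl_cons]
    rw [show pvStepB (none, d) x = (some x, d) from by simp [pvStepB, hx],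
      show pvStepB (some x, d) y =
        (none, if pvSlotNames.contains x then d.insert x y else d) from by simp [pvStepB, hy]]
    exact ih (fun t ht => hc t (by simp [ht]))
  | case2 c d hcc =>
    match c, hcc, hc with
    | [], _, _ => rfl
    | [x], _, hc =>
      have hx : x ∉ pvSpecialTokens := hc x (by simp)
      simp [pvStepB, hx, pvPairRec]
    | x :: y :: rest, hcc, _ => exact absurd rfl (hcc x y rest)

-- ===== VERDICT (by name: the statement is the Claim_ definition above) =====
theorem tokens_to_slots_py_spec : Claim_equal_tokens_to_slots_py := by
  intro tokens _
  show tokens_to_slots_py tokens = tokens_to_slots_py_alt tokens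
  simp only [tokens_to_slots_py, tokens_to_slots_py_alt]
  rw [pvLoopA, pvLoopB_filter,
    pvLoopB (pvCleanTokens tokens) PySem.Dict.empty
      (by intro t ht; simpa [pvCleanTokens] using (List.mem_filter.mp ht).2)]
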